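-- pv_equiv track=rewrite | github.com/fiabot/VariableConstraintGA | ProblemSpaces/LogicPuzzles/LogicPuzzle.py | grid_is_complete
-- ===== SOURCE A (Python) =====
-- def grid_is_complete(grid):
--     """
--        Check that there is exactly 1 "O"s
--     for each row and column in a grid
--     """
--     # check rows
--     rows_valid = [row.count("O") == 1 for row in grid]
--     if False in rows_valid:
--         return False
--
--     # check columns
--     for i in range(len(grid[0])):
--         c = 0
--         for row in grid:
--             if row[i] == "O":
--                 c += 1
--         if c != 1:
--             return False
--
--     return True
-- ===== SOURCE B (Python) =====
-- def grid_is_complete(grid):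
--     n = len(grid[0])
--     col_counts = [0] * n
--     for row in grid:
--         if row.count("O") != 1:
--             return False
--         col_counts = [col_counts[i] + (1 if row[i] == "O" else 0) for i in range(n)]
--     return all(c == 1 for c in col_counts)
-- ===== Notes on version B (the rewrite author's own statement) =====
-- stated objective: alternative
-- what changed: Replaces A's two-phase check (a full row-validity list, then a separate column-major rescan of the grid) by a single row-major sweep that maintains per-column accumulators and checks each row's count as it goes.
-- outside the precondition, e.g. on grid_is_complete([['O', 'X'], ['O'], ['X', 'X']]): A returns False, B raises IndexError
import Mathlib
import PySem

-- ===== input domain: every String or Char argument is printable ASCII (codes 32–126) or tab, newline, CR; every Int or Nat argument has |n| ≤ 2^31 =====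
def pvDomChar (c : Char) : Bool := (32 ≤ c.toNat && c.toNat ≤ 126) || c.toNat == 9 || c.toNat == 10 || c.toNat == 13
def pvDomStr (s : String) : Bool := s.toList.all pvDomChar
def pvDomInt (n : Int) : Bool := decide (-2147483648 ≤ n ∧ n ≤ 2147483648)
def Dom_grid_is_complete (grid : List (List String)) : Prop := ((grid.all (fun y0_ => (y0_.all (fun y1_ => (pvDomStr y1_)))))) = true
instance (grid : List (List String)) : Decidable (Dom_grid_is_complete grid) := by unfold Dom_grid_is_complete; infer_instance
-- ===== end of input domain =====

-- B replaces A's two-phase check (row-validity list, then a column-major rescan) by one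
-- row-major sweep keeping per-column accumulators; alternative decomposition, same cost.


-- ===== PORT A =====
def grid_is_complete (grid : List (List String)) : Bool :=
  let rows_valid := grid.map (fun row => PySem.List.count row "O" == 1)
  if rows_valid.contains false then false
  else
    match grid with
    | [] => false  -- Python raises IndexError at grid[0] here; outside Pre_
    | first :: _ =>
      (PySem.List.pyRange 0 (first.length : Int) 1).all (fun i =>
        grid.foldl (fun c row => if PySem.List.pyGetD row i "" == "O" then c + 1 else c) (0 : Int) == 1)

-- ===== PORT B =====
-- col_counts = [col_counts[i] + (1 if row[i] == "O" else 0) for i in range(n)]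
def altStep (n : Nat) (row : List String) (counts : List Int) : List Int :=
  (PySem.List.pyRange 0 (n : Int) 1).map
    (fun i => PySem.List.pyGetD counts i 0 + if PySem.List.pyGetD row i "" == "O" then 1 else 0)

-- the 'for row in grid' loop with its early 'return False'
def altLoop (n : Nat) (rows : List (List String)) (counts : List Int) : Bool :=
  match rows with
  | [] => counts.all (fun c => c == 1)
  | row :: rest =>
      if PySem.List.count row "O" == 1 then altLoop n rest (altStep n row counts) else false

def grid_is_complete_alt (grid : List (List String)) : Bool :=
  match grid with
  | [] => false  -- Python raises IndexError at len(grid[0]); outside Pre_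
  | first :: _ => altLoop first.length grid (List.replicate first.length 0)

-- ===== PRECONDITION & SPEC =====
-- Pre_ excludes the empty grid (A raises IndexError at grid[0]) and grids where a row
-- shorter than the first row precedes every row failing the one-"O" count: there A either
-- raises IndexError in its column scan or returns False only because its separate row pass
-- happens to run before the crashing column pass, while B, which interleaves the two
-- passes, raises IndexError instead.
def Pre_grid_is_complete (grid : List (List String)) : Prop :=
  grid ≠ [] ∧
    ∀ row ∈ grid.takeWhile (fun r => PySem.List.count r "O" == 1),
      (grid.headD []).length ≤ row.length
instance (grid : List (List String)) : Decidable (Pre_grid_is_complete grid) := by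
  unfold Pre_grid_is_complete; infer_instance

def pvWitness_grid_is_complete : List (List String) := [["O", "X"], ["X", "O"]]

def Spec_grid_is_complete (grid : List (List String)) (out : Bool) : Prop := out = grid_is_complete_alt grid
instance (grid : List (List String)) (out : Bool) : Decidable (Spec_grid_is_complete grid out) := by unfold Spec_grid_is_complete; infer_instance

-- ===== CLAIM (what is proved, stated in full; the proofs are below) =====
def Claim_equal_grid_is_complete : Prop := ∀ (grid : List (List String)), Dom_grid_is_complete grid → Pre_grid_is_complete grid → Spec_grid_is_complete grid (grid_is_complete grid)

-- ===== LEMMAS AND PROOFS =====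

-- number of "O"s that column i receives (out-of-range reads give "" which is never "O")
def colCnt (rows : List (List String)) (i : Int) : Int :=
  ((rows.countP (fun row => PySem.List.pyGetD row i "" == "O")) : Int)

theorem pyGetD_replicate_zero (n : Nat) (i : Int) :
    PySem.List.pyGetD (List.replicate n (0 : Int)) i 0 = 0 := by
  simp only [PySem.List.pyGetD, PySem.List.pyGet?, PySem.List.pyIdx?, List.length_replicate]
  split_ifs <;> simp_all [List.getElem?_replicate] <;> split <;> simp_all

theorem altLoop_false (n : Nat) (rows : List (List String)) (counts : List Int)
    (h : ¬ rows.all (fun r => PySem.List.count r "O" == 1)) :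
    altLoop n rows counts = false := by
  induction rows generalizing counts with
  | nil => simp at h
  | cons row rest ih =>
    simp only [altLoop]
    by_cases hr : (PySem.List.count row "O" == 1) = true
    · rw [if_pos hr]
      exact ih _ (by simp only [List.all_cons, hr, Bool.true_and] at h; exact h)
    · rw [if_neg hr]

theorem length_altStep (n : Nat) (row : List String) (counts : List Int) :
    (altStep n row counts).length = n := by
  simp [altStep, PySem.List.length_pyRange_one]

theorem altLoop_good (n : Nat) (rows : List (List String)) (counts : List Int)
    (hlen : counts.length = n)
    (hgood : ∀ r ∈ rows, (PySem.List.count r "O" == 1) = true) :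
    altLoop n rows counts =
      ((PySem.List.pyRange 0 (n : Int) 1).map
        (fun i => PySem.List.pyGetD counts i 0 + colCnt rows i)).all (fun c => c == 1) := by
  induction rows generalizing counts with
  | nil =>
    subst hlen
    simp only [altLoop, colCnt, List.countP_nil, Nat.cast_zero, add_zero]
    rw [PySem.List.map_pyGetD_pyRange_zero']
  | cons row rest ih =>
    simp only [altLoop, if_pos (hgood row (List.mem_cons_self))]
    rw [ih (altStep n row counts) (length_altStep n row counts)
        (fun r hr => hgood r (List.mem_cons_of_mem _ hr))]
    congr 1
    apply List.map_congr_left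
    intro i hi
    obtain ⟨h0, hn⟩ := (PySem.List.mem_pyRange_one).1 hi
    rw [show PySem.List.pyGetD (altStep n row counts) i 0
          = PySem.List.pyGetD counts i 0 + if PySem.List.pyGetD row i "" == "O" then 1 else 0 from
        PySem.List.pyGetD_map_pyRange_of_nonneg _ _ _ _ h0 hn]
    simp only [colCnt, List.countP_cons]
    split_ifs with hO <;> simp <;> ring

theorem foldl_col_eq_colCnt (rows : List (List String)) (i : Int) :
    rows.foldl (fun c row => if PySem.List.pyGetD row i "" == "O" then c + 1 else c) (0 : Int)
      = colCnt rows i := by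
  rw [PySem.List.foldl_if_add_one]
  simp [colCnt]

theorem grid_is_complete_spec : Claim_equal_grid_is_complete := by
  intro grid _ hpre
  unfold Spec_grid_is_complete
  obtain ⟨hne, hrows⟩ := hpre
  match grid with
  | [] => exact absurd rfl hne
  | first :: rest =>
    simp only [grid_is_complete, grid_is_complete_alt]
    by_cases hallP : ∀ r ∈ first :: rest, List.count "O" r = 1
    · have hcon : (((first :: rest).map (fun row => PySem.List.count row "O" == 1)).contains false) = false := by
        simp only [List.contains_eq_any_beq, List.any_map, List.any_eq_false]
        intro r hr
        simp [PySem.List.count_eq, hallP r hr]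
      rw [if_neg (by simp only [hcon]; exact Bool.false_ne_true)]
      rw [altLoop_good first.length (first :: rest) _ (by simp)
          (fun r hr => by simp [PySem.List.count_eq, hallP r hr])]
      rw [List.all_map]
      apply Bool.eq_iff_iff.mpr
      simp only [List.all_eq_true]
      refine forall_congr' fun i => imp_congr_right fun hi => ?_
      rw [Function.comp_apply, foldl_col_eq_colCnt, pyGetD_replicate_zero, zero_add]
    · have hnall : ¬ ((first :: rest).all (fun r => PySem.List.count r "O" == 1)) = true := by
        simp only [List.all_eq_true, PySem.List.count_eq, beq_iff_eq]
        exact hallP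
      push Not at hallP
      obtain ⟨r, hr, hbad⟩ := hallP
      have hcon : (((first :: rest).map (fun row => PySem.List.count row "O" == 1)).contains false) = true := by
        simp only [List.contains_eq_any_beq, List.any_map, List.any_eq_true]
        exact ⟨r, hr, by simp [PySem.List.count_eq, hbad]⟩
      rw [if_pos hcon]
      exact (altLoop_false _ _ _ hnall).symm
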